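-- pv_equiv track=rewrite | github.com/dragon1086/prism-insight | cores/utils.py | _fix_markdown_tables
-- ===== SOURCE A (Python) =====
-- def _fix_markdown_tables(text: str) -> str:
--     lines = text.split('\n')
--     cleaned_lines = []
--     i = 0
--     while i < len(lines):
--         line = lines[i]
--         if line.strip().startswith('|') and not line.strip().endswith('|'):
--             merged = line
--             while i + 1 < len(lines) and not merged.strip().endswith('|'):
--                 i += 1
--                 merged += lines[i]
--             cleaned_lines.append(merged)
--         else:
--             cleaned_lines.append(line)
--         i += 1
--
--     text = '\n'.join(cleaned_lines)
--     lines = text.split('\n')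
--     result_lines = []
--     for i, line in enumerate(lines):
--         stripped = line.strip()
--         is_table_line = stripped.startswith('|')
--         prev_line = lines[i - 1].strip() if i > 0 else ''
--         prev_is_table = prev_line.startswith('|')
--         prev_is_empty = prev_line == ''
--         if is_table_line and not prev_is_table and not prev_is_empty:
--             result_lines.append('')
--         result_lines.append(line)
--
--     final_lines = []
--     for i, line in enumerate(result_lines):
--         final_lines.append(line)
--         stripped = line.strip()
--         is_table_line = stripped.startswith('|')
--         if is_table_line and i + 1 < len(result_lines):
--             next_line = result_lines[i + 1].strip()
--             next_is_table = next_line.startswith('|')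
--             next_is_empty = next_line == ''
--             if not next_is_table and not next_is_empty:
--                 final_lines.append('')
--     return '\n'.join(final_lines)
-- ===== SOURCE B (Python) =====
-- def _fix_markdown_tables(text: str) -> str:
--     # Merge broken table lines by folding from the RIGHT: an open '|' line absorbs
--     # already-built suffix entries until it ends with '|'.
--     merged = []
--     for line in reversed(text.split('\n')):
--         s = line.strip()
--         if s.startswith('|') and not s.endswith('|'):
--             while merged and not line.strip().endswith('|'):
--                 line = line + merged.pop(0)
--         merged.insert(0, line)
--
--     # Group merged lines into maximal runs of equal 'table-ness', then emit each
--     # table run wrapped in blank lines when its neighbouring run's adjacent line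
--     # is non-blank (neighbouring runs are non-table by maximality).
--     runs = []
--     for line in merged:
--         t = line.strip().startswith('|')
--         if runs and runs[-1][0] == t:
--             runs[-1][1].append(line)
--         else:
--             runs.append((t, [line]))
--
--     out = []
--     for k, (t, block) in enumerate(runs):
--         if t:
--             if k > 0 and runs[k - 1][1][-1].strip() != '':
--                 out.append('')
--             out.extend(block)
--             if k + 1 < len(runs) and runs[k + 1][1][0].strip() != '':
--                 out.append('')
--         else:
--             out.extend(block)
--     return '\n'.join(out)
-- ===== Notes on version B (the rewrite author's own statement) =====
-- stated objective: alternative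
-- what changed: A's left-to-right index-driven merge loop becomes a right fold in which an open '|' line absorbs entries of the already-built suffix, and A's two per-line blank-insertion passes are replaced by grouping the merged lines into maximal runs of equal table-ness and emitting each table run wrapped in blank lines decided from the neighbouring runs' adjacent lines.
import Mathlib
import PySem

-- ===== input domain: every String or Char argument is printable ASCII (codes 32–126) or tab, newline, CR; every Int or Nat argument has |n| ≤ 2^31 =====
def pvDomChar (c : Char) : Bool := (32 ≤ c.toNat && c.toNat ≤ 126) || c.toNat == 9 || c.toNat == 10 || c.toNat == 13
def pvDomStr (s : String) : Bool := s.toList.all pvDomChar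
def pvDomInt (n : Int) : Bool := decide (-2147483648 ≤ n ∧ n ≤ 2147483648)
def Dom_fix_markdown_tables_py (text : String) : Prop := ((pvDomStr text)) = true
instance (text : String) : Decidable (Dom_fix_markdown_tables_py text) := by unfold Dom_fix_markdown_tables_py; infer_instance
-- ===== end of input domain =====

-- B merges broken '|' lines by a RIGHT fold that absorbs already-built suffix entries,
-- then groups the merged lines into maximal runs of equal table-ness and emits each
-- table run wrapped in blank lines decided from the neighbouring runs' adjacent lines;
-- objective: alternative decomposition (run/block structure instead of per-line passes).

-- ===== PORT A =====

-- inner 'while i + 1 < len(lines) and not merged.strip().endswith("|")' loop of A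
def pvAbsorb (merged : String) (rest : List String) : String × List String :=
  match rest with
  | [] => (merged, [])
  | x :: xs =>
    if !(PySem.Str.endswith (PySem.Str.strip merged) "|") then pvAbsorb (merged ++ x) xs
    else (merged, x :: xs)

lemma pvAbsorb_snd_length (m : String) (rest : List String) :
    (pvAbsorb m rest).2.length ≤ rest.length := by
  induction rest generalizing m with
  | nil => simp [pvAbsorb]
  | cons x xs ih =>
    simp only [pvAbsorb]
    split
    · exact le_trans (ih _) (by simp)
    · simp

-- A's first while-loop: merge broken table lines
def pvMergeA : List String → List String
  | [] => []
  | line :: rest =>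
    if PySem.Str.startswith (PySem.Str.strip line) "|" &&
       !(PySem.Str.endswith (PySem.Str.strip line) "|") then
      (pvAbsorb line rest).1 :: pvMergeA (pvAbsorb line rest).2
    else line :: pvMergeA rest
termination_by ls => ls.length
decreasing_by
  · have := pvAbsorb_snd_length line rest
    simp only [List.length_cons]
    omega
  · simp

-- A's second loop: blank line BEFORE a table line (prev_line is the previous line stripped,
-- '' for the first line, carried as the recursion state)
def pvPass2 (prev_line : String) : List String → List String
  | [] => []
  | line :: rest =>
    (if PySem.Str.startswith (PySem.Str.strip line) "|" &&
        !(PySem.Str.startswith prev_line "|") && !(prev_line == "")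
     then ["", line] else [line])
    ++ pvPass2 (PySem.Str.strip line) rest

-- A's third loop: blank line AFTER a table line (looks one element ahead in result_lines)
def pvPass3 : List String → List String
  | [] => []
  | [line] => [line]
  | line :: next :: rest =>
    (if PySem.Str.startswith (PySem.Str.strip line) "|" &&
        !(PySem.Str.startswith (PySem.Str.strip next) "|") &&
        !(PySem.Str.strip next == "")
     then [line, ""] else [line])
    ++ pvPass3 (next :: rest)

def fix_markdown_tables_py (text : String) : String :=
  let lines := (PySem.Str.split? text "\n").getD []
  let cleaned_lines := pvMergeA lines
  let text2 := PySem.Str.join "\n" cleaned_lines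
  let lines2 := (PySem.Str.split? text2 "\n").getD []
  PySem.Str.join "\n" (pvPass3 (pvPass2 "" lines2))

-- ===== PORT B =====

-- B's inner while loop: an open table line absorbs entries of the already-built suffix
-- until it ends with '|' (or the suffix is exhausted)
def pvPopLoop : String → List String → List String
  | line, [] => [line]
  | line, g :: gs =>
    if PySem.Str.endswith (PySem.Str.strip line) "|" then line :: g :: gs
    else pvPopLoop (line ++ g) gs

-- B's merge: fold from the right over the lines ('for line in reversed(...)')
def pvMergeBack : List String → List String
  | [] => []
  | line :: rest =>
    let m := pvMergeBack rest
    if PySem.Str.startswith (PySem.Str.strip line) "|" &&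
       !(PySem.Str.endswith (PySem.Str.strip line) "|") then pvPopLoop line m
    else line :: m

-- B's grouping of the merged lines into maximal runs of equal table-ness
def pvRuns : List String → List (Bool × List String)
  | [] => []
  | l :: ls =>
    match pvRuns ls with
    | [] => [(PySem.Str.startswith (PySem.Str.strip l) "|", [l])]
    | (t0, b) :: rs =>
      if PySem.Str.startswith (PySem.Str.strip l) "|" == t0 then (t0, l :: b) :: rs
      else (PySem.Str.startswith (PySem.Str.strip l) "|", [l]) :: (t0, b) :: rs

-- B's emission: each table run wrapped in blank lines decided from the neighbouring
-- runs' adjacent lines (prev carries the previous run's last line, stripped; '' at k=0)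
def pvEmit (prev : String) : List (Bool × List String) → List String
  | [] => []
  | (t, b) :: rs =>
    (if t then
       (if prev != "" then [""] else [])
       ++ b
       ++ (match rs with
           | [] => []
           | (_, b2) :: _ => if PySem.Str.strip (b2.headD "") != "" then [""] else [])
     else b)
    ++ pvEmit (PySem.Str.strip (b.getLastD "")) rs

def fix_markdown_tables_py_alt (text : String) : String :=
  let merged := pvMergeBack ((PySem.Str.split? text "\n").getD [])
  PySem.Str.join "\n" (pvEmit "" (pvRuns merged))

-- ===== PRECONDITION & SPEC =====
def Spec_fix_markdown_tables_py (text : String) (out : String) : Prop := out = fix_markdown_tables_py_alt text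
instance (text : String) (out : String) : Decidable (Spec_fix_markdown_tables_py text out) := by unfold Spec_fix_markdown_tables_py; infer_instance

-- ===== CLAIM (what is proved, stated in full; the proofs are below) =====
def Claim_equal_fix_markdown_tables_py : Prop := ∀ (text : String), Dom_fix_markdown_tables_py text → Spec_fix_markdown_tables_py text (fix_markdown_tables_py text)

-- ===== LEMMAS AND PROOFS =====

-- a direct, fuel-free description of splitting a char list at '\n'
def pvSplitNL : List Char → List (List Char)
  | [] => [[]]
  | c :: rest =>
    if c = '\n' then [] :: pvSplitNL rest
    else
      match pvSplitNL rest with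
      | [] => [[c]]
      | a :: as => (c :: a) :: as

lemma pvSplitNL_ne_nil (l : List Char) : pvSplitNL l ≠ [] := by
  cases l with
  | nil => simp [pvSplitNL]
  | cons c rest =>
    simp only [pvSplitNL]
    split
    · simp
    · split <;> simp

lemma pvSplitOn_go_eq (l : List Char) : ∀ (fuel : Nat) (cur : List Char) (acc : List (List Char)),
    l.length < fuel →
    PySem.Chars.splitOn.go ['\n'] fuel l cur acc
      = acc.reverse ++ (match pvSplitNL l with
                        | [] => []
                        | a :: as => (cur.reverse ++ a) :: as) := by
  induction l with
  | nil =>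
    intro fuel cur acc h
    match fuel with
    | f + 1 => simp [PySem.Chars.splitOn.go, pvSplitNL]
  | cons c rest ih =>
    intro fuel cur acc h
    match fuel with
    | f + 1 =>
      by_cases hc : c = '\n'
      · subst hc
        have hpre : List.isPrefixOf ['\n'] ('\n' :: rest) = true := by
          simp [List.isPrefixOf]
        rw [PySem.Chars.splitOn.go, if_pos hpre]
        have hdrop : List.drop (['\n'] : List Char).length ('\n' :: rest) = rest := rfl
        rw [hdrop, ih f [] (cur.reverse :: acc) (by simpa using h)]
        rcases hnil : pvSplitNL rest with _ | ⟨a, as⟩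
        · exact absurd hnil (pvSplitNL_ne_nil rest)
        · simp [pvSplitNL, hnil]
      · have hpre : List.isPrefixOf ['\n'] (c :: rest) = false := by
          simp [List.isPrefixOf]
          exact fun hh => absurd hh.symm hc
        rw [PySem.Chars.splitOn.go, if_neg (by simp [hpre])]
        rw [ih f (c :: cur) acc (by simpa using h)]
        rcases hnil : pvSplitNL rest with _ | ⟨a, as⟩
        · exact absurd hnil (pvSplitNL_ne_nil rest)
        · simp [pvSplitNL, hc, hnil]

lemma pvSplitOn_nl (s : List Char) : PySem.Chars.splitOn s ['\n'] = pvSplitNL s := by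
  unfold PySem.Chars.splitOn
  rw [pvSplitOn_go_eq s (s.length + 1) [] [] (by omega)]
  rcases hnil : pvSplitNL s with _ | ⟨a, as⟩
  · exact absurd hnil (pvSplitNL_ne_nil s)
  · simp

lemma pvSplitNL_mem_nlfree (l : List Char) : ∀ a ∈ pvSplitNL l, '\n' ∉ a := by
  induction l with
  | nil => simp [pvSplitNL]
  | cons c rest ih =>
    by_cases hc : c = '\n'
    · subst hc
      simp only [pvSplitNL]
      intro a ha
      rcases List.mem_cons.mp ha with h | h
      · subst h; simp
      · exact ih a h
    · simp only [pvSplitNL, if_neg hc]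
      rcases hnil : pvSplitNL rest with _ | ⟨b, bs⟩
      · exact absurd hnil (pvSplitNL_ne_nil rest)
      · intro a ha
        rcases List.mem_cons.mp ha with h | h
        · subst h
          intro hmem
          rcases List.mem_cons.mp hmem with h1 | h1
          · exact hc h1.symm
          · exact ih b (by rw [hnil]; simp) h1
        · exact ih a (by rw [hnil]; simp [h])

lemma pvSplitNL_nlfree (m : List Char) (h : '\n' ∉ m) : pvSplitNL m = [m] := by
  induction m with
  | nil => simp [pvSplitNL]
  | cons c rest ih =>
    have hc : c ≠ '\n' := fun hh => h (by simp [hh])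
    have hr : '\n' ∉ rest := fun hh => h (List.mem_cons_of_mem c hh)
    simp [pvSplitNL, hc, ih hr]

lemma pvSplitNL_append (m t : List Char) (h : '\n' ∉ m) :
    pvSplitNL (m ++ '\n' :: t) = m :: pvSplitNL t := by
  induction m with
  | nil => simp [pvSplitNL]
  | cons c rest ih =>
    have hc : c ≠ '\n' := fun hh => h (by simp [hh])
    have hr : '\n' ∉ rest := fun hh => h (List.mem_cons_of_mem c hh)
    simp [pvSplitNL, hc, ih hr]

lemma pvSplitNL_join (ms : List (List Char)) (h1 : ms ≠ []) (h2 : ∀ m ∈ ms, '\n' ∉ m) :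
    pvSplitNL (PySem.Chars.join ['\n'] ms) = ms := by
  induction ms with
  | nil => exact absurd rfl h1
  | cons m rest ih =>
    cases rest with
    | nil =>
      rw [PySem.Chars.join_singleton]
      exact pvSplitNL_nlfree m (h2 m (by simp))
    | cons m' rest' =>
      rw [PySem.Chars.join_cons_cons, List.append_assoc, List.singleton_append]
      rw [pvSplitNL_append m _ (h2 m (by simp))]
      rw [ih (by simp) (fun x hx => h2 x (List.mem_cons_of_mem m hx))]

lemma pvJoin_toList (ms : List String) :
    (PySem.Str.join "\n" ms).toList = PySem.Chars.join ['\n'] (ms.map String.toList) := by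
  unfold PySem.Str.join
  rw [String.toList_ofList]
  rw [show ("\n" : String).toList = ['\n'] from rfl]

-- what splitting at '\n' computes, as a map over pvSplitNL
lemma pvSplit_getD (text : String) :
    (PySem.Str.split? text "\n").getD [] = (pvSplitNL text.toList).map String.ofList := by
  unfold PySem.Str.split? PySem.Chars.split?
  rw [show ("\n" : String).toList = ['\n'] from rfl]
  rw [if_neg (by simp)]
  simp [pvSplitOn_nl]

-- split ∘ join is the identity on nonempty lists of newline-free strings
lemma pvSplitJoin (ms : List String) (h1 : ms ≠ []) (h2 : ∀ m ∈ ms, '\n' ∉ m.toList) :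
    (PySem.Str.split? (PySem.Str.join "\n" ms) "\n").getD [] = ms := by
  rw [pvSplit_getD, pvJoin_toList]
  rw [pvSplitNL_join (ms.map String.toList) (by simpa using h1) (by
    intro m hm
    rcases List.mem_map.mp hm with ⟨x, hx, rfl⟩
    exact h2 x hx)]
  simp [List.map_map, Function.comp_def, String.ofList_toList]

-- every line produced by splitting on '\n' is newline-free
lemma pvSplitLines_nlfree (text : String) :
    ∀ m ∈ (PySem.Str.split? text "\n").getD [], '\n' ∉ m.toList := by
  rw [pvSplit_getD]
  intro m hm
  rcases List.mem_map.mp hm with ⟨a, ha, rfl⟩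
  rw [String.toList_ofList]
  exact pvSplitNL_mem_nlfree text.toList a ha

lemma pvSplitLines_ne_nil (text : String) :
    (PySem.Str.split? text "\n").getD [] ≠ [] := by
  rw [pvSplit_getD]
  simpa using pvSplitNL_ne_nil text.toList

-- pvAbsorb only concatenates lines, so it preserves newline-freeness
lemma pvAbsorb_nlfree (m : String) (rest : List String) (hm : '\n' ∉ m.toList)
    (hr : ∀ x ∈ rest, '\n' ∉ x.toList) :
    '\n' ∉ (pvAbsorb m rest).1.toList ∧ ∀ x ∈ (pvAbsorb m rest).2, '\n' ∉ x.toList := by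
  induction rest generalizing m with
  | nil => simpa [pvAbsorb] using hm
  | cons x xs ih =>
    simp only [pvAbsorb]
    split
    · exact ih (m ++ x)
        (by simp [hm, hr x (by simp)])
        (fun y hy => hr y (List.mem_cons_of_mem x hy))
    · exact ⟨hm, hr⟩

lemma pvMergeA_nlfree (ls : List String) :
    (∀ x ∈ ls, '\n' ∉ x.toList) → ∀ x ∈ pvMergeA ls, '\n' ∉ x.toList := by
  induction ls using pvMergeA.induct with
  | case1 => intro h; simp [pvMergeA]
  | case2 line rest hg ih =>
    intro h
    rw [pvMergeA, if_pos hg]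
    have ha := pvAbsorb_nlfree line rest (h line (by simp))
      (fun y hy => h y (List.mem_cons_of_mem line hy))
    intro x hx
    rcases List.mem_cons.mp hx with hx | hx
    · subst hx; exact ha.1
    · exact ih ha.2 x hx
  | case3 line rest hg ih =>
    intro h
    rw [pvMergeA, if_neg hg]
    intro x hx
    rcases List.mem_cons.mp hx with hx | hx
    · rw [hx]; exact h line (by simp)
    · exact ih (fun y hy => h y (List.mem_cons_of_mem line hy)) x hx

lemma pvMergeA_ne_nil (ls : List String) (h : ls ≠ []) : pvMergeA ls ≠ [] := by
  cases ls with
  | nil => exact absurd rfl h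
  | cons line rest =>
    rw [pvMergeA]
    split <;> simp

-- ---- the stripped-endswith characterisation used by the merge equivalence ----

lemma pvDropHead (p : Char → Bool) (l : List Char) :
    (List.dropWhile p ((List.dropWhile p l).reverse)).head? = (List.dropWhile p l.reverse).head? := by
  induction l with
  | nil => simp
  | cons c t ih =>
    by_cases hc : p c = true
    · rw [List.dropWhile_cons_of_pos hc, ih, List.reverse_cons, List.dropWhile_append]
      rcases hd : List.dropWhile p t.reverse with _ | ⟨a, u⟩
      · simp [List.dropWhile_cons_of_pos hc]
      · simp
    · rw [List.dropWhile_cons_of_neg hc]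

lemma pvSuffixBar (x : List Char) :
    List.isSuffixOf ['|'] x = (x.reverse.head? == some '|') := by
  rw [List.isSuffixOf]
  rcases h : x.reverse with _ | ⟨a, t⟩
  · simp
  · simp [List.isPrefixOf, eq_comm]

lemma pvEndsStrip (s : List Char) :
    PySem.Chars.endswith (PySem.Chars.strip s) ['|']
      = ((List.dropWhile PySem.Chars.isspace s.reverse).head? == some '|') := by
  unfold PySem.Chars.endswith PySem.Chars.strip PySem.Chars.rstrip PySem.Chars.lstrip
  rw [pvSuffixBar, List.reverse_reverse, pvDropHead]

lemma pvEndsAppendChars (a b : List Char)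
    (h : PySem.Chars.endswith (PySem.Chars.strip a) ['|'] = false) :
    PySem.Chars.endswith (PySem.Chars.strip (a ++ b)) ['|']
      = PySem.Chars.endswith (PySem.Chars.strip b) ['|'] := by
  rw [pvEndsStrip] at h ⊢
  rw [pvEndsStrip, List.reverse_append, List.dropWhile_append]
  rcases hb : List.dropWhile PySem.Chars.isspace b.reverse with _ | ⟨c, t⟩
  · simpa using h
  · simp

-- String-level form: if a's stripped form does not end in '|', appending b decides 'ends in |'
lemma pvEndsAppend (a b : String)
    (h : PySem.Str.endswith (PySem.Str.strip a) "|" = false) :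
    PySem.Str.endswith (PySem.Str.strip (a ++ b)) "|"
      = PySem.Str.endswith (PySem.Str.strip b) "|" := by
  have hb : ("|" : String).toList = ['|'] := rfl
  simp only [PySem.Str.endswith_eq, PySem.Str.toList_strip, hb] at h ⊢
  rw [String.toList_append]
  exact pvEndsAppendChars a.toList b.toList h

-- absorbing from acc ++ x runs exactly the absorb loop of x, prefixed by acc
lemma pvAbsorb_factor (xs : List String) : ∀ (acc x : String),
    PySem.Str.endswith (PySem.Str.strip acc) "|" = false →
    pvAbsorb (acc ++ x) xs = (acc ++ (pvAbsorb x xs).1, (pvAbsorb x xs).2) := by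
  induction xs with
  | nil => intro acc x h; simp [pvAbsorb]
  | cons y ys ih =>
    intro acc x h
    simp only [pvAbsorb]
    rw [pvEndsAppend acc x h]
    cases he : PySem.Str.endswith (PySem.Str.strip x) "|"
    · rw [if_pos (by decide), if_pos (by decide), String.append_assoc]
      exact ih acc (x ++ y) h
    · rw [if_neg (by decide), if_neg (by decide)]

-- if the absorb loop stops without the merged line ending in '|', the list was exhausted
lemma pvAbsorb_stop (rest : List String) : ∀ (m : String),
    PySem.Str.endswith (PySem.Str.strip (pvAbsorb m rest).1) "|" = false →
    (pvAbsorb m rest).2 = [] := by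
  induction rest with
  | nil => intro m _; simp [pvAbsorb]
  | cons x xs ih =>
    intro m h
    simp only [pvAbsorb] at h ⊢
    by_cases he : PySem.Str.endswith (PySem.Str.strip m) "|" = true
    · rw [he] at h ⊢
      simp at h
      exact absurd he (by simp [h])
    · have he' : PySem.Str.endswith (PySem.Str.strip m) "|" = false := by simpa using he
      rw [he'] at h ⊢
      simp only [Bool.not_false] at h ⊢
      exact ih (m ++ x) h

lemma pvPopLoop_stop (l : List String) (acc : String)
    (h : PySem.Str.endswith (PySem.Str.strip acc) "|" = true) :
    pvPopLoop acc l = acc :: l := by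
  cases l with
  | nil => rfl
  | cons g gs => rw [pvPopLoop, if_pos h]

-- popping merged groups from A's merge result re-runs A's absorb loop
lemma pvPopLoop_merge (rest : List String) : ∀ (acc : String),
    PySem.Str.endswith (PySem.Str.strip acc) "|" = false →
    pvPopLoop acc (pvMergeA rest)
      = (pvAbsorb acc rest).1 :: pvMergeA (pvAbsorb acc rest).2 := by
  induction rest using pvMergeA.induct with
  | case1 => intro acc h; simp [pvMergeA, pvPopLoop, pvAbsorb]
  | case2 line rest hg ih =>
    intro acc h
    have hend : PySem.Str.endswith (PySem.Str.strip line) "|" = false := by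
      have h2 := hg
      simp only [Bool.and_eq_true, Bool.not_eq_true'] at h2
      exact h2.2
    rw [pvMergeA, if_pos hg]
    have habs : pvAbsorb acc (line :: rest) = pvAbsorb (acc ++ line) rest := by
      rw [pvAbsorb, if_pos (by rw [h]; rfl)]
    rw [habs, pvAbsorb_factor rest acc line h]
    rw [pvPopLoop, if_neg (by rw [h]; simp)]
    by_cases hg2 : PySem.Str.endswith (PySem.Str.strip (pvAbsorb line rest).1) "|" = true
    · rw [pvPopLoop_stop _ _ (by rw [pvEndsAppend acc _ h]; exact hg2)]
    · have hg2' : PySem.Str.endswith (PySem.Str.strip (pvAbsorb line rest).1) "|" = false := by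
        simpa using hg2
      have hnil := pvAbsorb_stop rest line hg2'
      rw [hnil]
      simp [pvMergeA, pvPopLoop]
  | case3 line rest hg ih =>
    intro acc h
    rw [pvMergeA, if_neg hg]
    rw [pvPopLoop, if_neg (by rw [h]; simp)]
    have habs : pvAbsorb acc (line :: rest) = pvAbsorb (acc ++ line) rest := by
      rw [pvAbsorb, if_pos (by rw [h]; rfl)]
    rw [habs]
    by_cases he : PySem.Str.endswith (PySem.Str.strip line) "|" = true
    · have hae : PySem.Str.endswith (PySem.Str.strip (acc ++ line)) "|" = true := by
        rw [pvEndsAppend acc line h]; exact he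
      rw [pvPopLoop_stop _ _ hae]
      cases rest with
      | nil => simp [pvAbsorb, pvMergeA]
      | cons y ys => rw [pvAbsorb, if_neg (by rw [hae]; simp)]
    · have he' : PySem.Str.endswith (PySem.Str.strip line) "|" = false := by simpa using he
      exact ih (acc ++ line) (by rw [pvEndsAppend acc line h]; exact he')

-- B's right-fold merge computes A's left-to-right merge
lemma pvMergeBA (ls : List String) : pvMergeBack ls = pvMergeA ls := by
  induction ls with
  | nil => simp [pvMergeBack, pvMergeA]
  | cons line rest ih =>
    by_cases hg : (PySem.Str.startswith (PySem.Str.strip line) "|" &&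
       !(PySem.Str.endswith (PySem.Str.strip line) "|")) = true
    · have hend : PySem.Str.endswith (PySem.Str.strip line) "|" = false := by
        have h2 := hg
        simp only [Bool.and_eq_true, Bool.not_eq_true'] at h2
        exact h2.2
      rw [pvMergeBack]
      simp only [if_pos hg, ih]
      rw [pvPopLoop_merge rest line hend, pvMergeA, if_pos hg]
    · rw [pvMergeBack]
      simp only [if_neg hg, ih]
      rw [pvMergeA, if_neg hg]

-- ---- the single-pass bridge between A's two insertion loops and B's run emission ----

-- per-line form of the blank insertion: blank before and after a table line, judged
-- from the original neighbours (prev = previous line stripped)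
def pvPassM (prev : String) : List String → List String
  | [] => []
  | line :: rest =>
    if PySem.Str.startswith (PySem.Str.strip line) "|" then
      (if prev != "" && !(PySem.Str.startswith prev "|") then [""] else [])
      ++ [line]
      ++ (match rest with
          | [] => []
          | nxt :: _ =>
            if PySem.Str.strip nxt != "" && !(PySem.Str.startswith (PySem.Str.strip nxt) "|")
            then [""] else [])
      ++ pvPassM (PySem.Str.strip line) rest
    else line :: pvPassM (PySem.Str.strip line) rest

lemma pvPass3_cons_nontable (l : String) (t : List String)
    (h : PySem.Str.startswith (PySem.Str.strip l) "|" = false) :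
    pvPass3 (l :: t) = l :: pvPass3 t := by
  cases t with
  | nil => rfl
  | cons x xs =>
    rw [pvPass3, h]
    simp

-- the 'blank before' conditions of A and the bridge agree on table lines
lemma pvPreCond (l prev : String) (hT : PySem.Str.startswith (PySem.Str.strip l) "|" = true) :
    (PySem.Str.startswith (PySem.Str.strip l) "|" &&
       !(PySem.Str.startswith prev "|") && !(prev == ""))
    = (prev != "" && !(PySem.Str.startswith prev "|")) := by
  rw [hT]
  cases PySem.Str.startswith prev "|" <;> cases h : prev == "" <;> simp [bne, h]

-- the 'blank after' conditions of A and the bridge agree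
lemma pvAfterCond (next : String) :
    (!(PySem.Str.startswith (PySem.Str.strip next) "|") && !(PySem.Str.strip next == ""))
    = (PySem.Str.strip next != "" && !(PySem.Str.startswith (PySem.Str.strip next) "|")) := by
  cases PySem.Str.startswith (PySem.Str.strip next) "|" <;>
    cases h : PySem.Str.strip next == "" <;> simp [bne, h]

lemma pvPass3_pre (c : Bool) (l : String) (X : List String) :
    pvPass3 ((if c then ["", l] else [l]) ++ X) = (if c then [""] else []) ++ pvPass3 (l :: X) := by
  cases c
  · simp
  · rw [if_pos (by trivial), if_pos (by trivial)]
    rw [show ((["", l] : List String) ++ X) = "" :: l :: X from rfl]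
    rw [pvPass3_cons_nontable "" (l :: X) (by decide)]
    rfl

lemma pvPassM_cons_nontable (prev l : String) (rest : List String)
    (h : PySem.Str.startswith (PySem.Str.strip l) "|" = false) :
    pvPassM prev (l :: rest) = l :: pvPassM (PySem.Str.strip l) rest := by
  cases rest with
  | nil =>
    simp only [pvPassM]
    rw [h]
    simp
  | cons y ys =>
    simp only [pvPassM]
    rw [h]
    simp

lemma pvPass2_cons_of_prev_table (prev l : String) (ls : List String)
    (hprev : PySem.Str.startswith prev "|" = true) :
    pvPass2 prev (l :: ls) = l :: pvPass2 (PySem.Str.strip l) ls := by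
  rw [pvPass2, hprev]
  simp

-- A's two insertion loops compose into the per-line bridge pass
lemma pvPassEq (ls : List String) : ∀ (prev : String),
    pvPass3 (pvPass2 prev ls) = pvPassM prev ls := by
  induction ls with
  | nil => intro prev; rfl
  | cons l rest ih =>
    intro prev
    by_cases hT : PySem.Str.startswith (PySem.Str.strip l) "|" = true
    · cases rest with
      | nil =>
        rw [pvPass2, pvPassM, if_pos hT, pvPreCond l prev hT, pvPass3_pre]
        cases prev != "" && !(PySem.Str.startswith prev "|") <;>
          simp [pvPass2, pvPass3, pvPassM]
      | cons l' rs =>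
        rw [pvPass2, pvPassM, if_pos hT, pvPreCond l prev hT, pvPass3_pre,
            pvPass2_cons_of_prev_table (PySem.Str.strip l) l' rs hT]
        rw [pvPass3, hT, Bool.true_and, pvAfterCond l']
        rw [← pvPass2_cons_of_prev_table (PySem.Str.strip l) l' rs hT, ih]
        cases prev != "" && !(PySem.Str.startswith prev "|") <;>
          cases PySem.Str.strip l' != "" && !(PySem.Str.startswith (PySem.Str.strip l') "|") <;>
            simp
    · have hT' : PySem.Str.startswith (PySem.Str.strip l) "|" = false := by
        simpa using hT
      rw [pvPass2, hT']
      simp only [Bool.false_and, Bool.false_eq_true, if_false, List.singleton_append]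
      rw [pvPass3_cons_nontable l _ hT', ih, pvPassM_cons_nontable prev l rest hT']

-- ---- run structure of pvRuns and the emission equivalence ----

lemma pvGetLastD_irrel (t : List String) (a d : String) :
    (a :: t).getLastD d = (a :: t).getLastD "" := by
  cases t with
  | nil => rfl
  | cons b t' => simp [List.getLastD_eq_getLast?, List.getLast?_cons]

lemma pvGetLastD_mem (b : List String) (h : b ≠ []) : b.getLastD "" ∈ b := by
  induction b with
  | nil => exact absurd rfl h
  | cons a t ih =>
    cases t with
    | nil => simp [List.getLastD]
    | cons b' t' =>
      rw [List.getLastD_cons, pvGetLastD_irrel]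
      exact List.mem_cons_of_mem a (ih (by simp))

lemma pvRuns_decomp (ls : List String) (h : ls ≠ []) : ∃ b ls',
    pvRuns ls = (PySem.Str.startswith (PySem.Str.strip (ls.headD "")) "|", b) :: pvRuns ls'
    ∧ ls = b ++ ls' ∧ b ≠ []
    ∧ (∀ x ∈ b, PySem.Str.startswith (PySem.Str.strip x) "|"
          = PySem.Str.startswith (PySem.Str.strip (ls.headD "")) "|")
    ∧ (∀ x ∈ ls'.head?, PySem.Str.startswith (PySem.Str.strip x) "|"
          = !PySem.Str.startswith (PySem.Str.strip (ls.headD "")) "|") := by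
  induction ls with
  | nil => exact absurd rfl h
  | cons l ls0 ih =>
    cases ls0 with
    | nil =>
      refine ⟨[l], [], by simp [pvRuns], by simp, by simp, by simp, by simp⟩
    | cons y ys =>
      obtain ⟨b0, ls1, hR, hEq, hNe, hMem, hAlt⟩ := ih (by simp)
      simp only [List.headD_cons] at hR hEq hMem hAlt ⊢
      by_cases htb : PySem.Str.startswith (PySem.Str.strip l) "|"
          = PySem.Str.startswith (PySem.Str.strip y) "|"
      · refine ⟨l :: b0, ls1, ?_, by rw [List.cons_append, ← hEq], by simp, ?_, ?_⟩
        · rw [pvRuns, hR]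
          dsimp only
          rw [if_pos (by rw [htb]; exact beq_self_eq_true _), htb]
        · intro x hx
          rcases List.mem_cons.mp hx with hx | hx
          · rw [hx]
          · rw [hMem x hx, htb]
        · intro x hx
          rw [hAlt x hx, htb]
      · refine ⟨[l], y :: ys, ?_, by simp, by simp, by simp, ?_⟩
        · rw [pvRuns, hR]
          dsimp only
          rw [if_neg (by simp only [beq_iff_eq]; exact htb), ← hR]
        · intro x hx
          simp only [List.head?_cons, Option.mem_some_iff] at hx
          subst hx
          cases h1 : PySem.Str.startswith (PySem.Str.strip l) "|" <;>
            cases h2 : PySem.Str.startswith (PySem.Str.strip y) "|" <;>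
              simp_all

-- a maximal table run emits: optional blank, the block, optional blank read off the next line
lemma pvPassM_tableRun (b : List String) (hne : b ≠ [])
    (hall : ∀ x ∈ b, PySem.Str.startswith (PySem.Str.strip x) "|" = true) :
    ∀ (rest : List String) (prev : String),
    (∀ h ∈ rest.head?, PySem.Str.startswith (PySem.Str.strip h) "|" = false) →
    pvPassM prev (b ++ rest) =
      (if prev != "" && !(PySem.Str.startswith prev "|") then [""] else [])
      ++ b
      ++ (match rest.head? with
          | none => []
          | some nxt => if PySem.Str.strip nxt != "" then [""] else [])
      ++ pvPassM (PySem.Str.strip (b.getLastD "")) rest := by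
  induction b with
  | nil => exact absurd rfl hne
  | cons l b2 ih =>
    intro rest prev hrest
    have hl : PySem.Str.startswith (PySem.Str.strip l) "|" = true := hall l (by simp)
    cases b2 with
    | nil =>
      cases rest with
      | nil =>
        simp only [List.append_nil, pvPassM, hl]
        simp
      | cons n ns =>
        have hn : PySem.Str.startswith (PySem.Str.strip n) "|" = false :=
          hrest n (by simp)
        simp only [List.singleton_append, pvPassM, hl, hn, List.head?_cons,
          List.getLastD]
        simp
    | cons l2 b3 =>
      have hl2 : PySem.Str.startswith (PySem.Str.strip l2) "|" = true :=
        hall l2 (by simp)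
      have hstep : pvPassM prev ((l :: l2 :: b3) ++ rest)
          = (if prev != "" && !(PySem.Str.startswith prev "|") then [""] else [])
            ++ [l] ++ pvPassM (PySem.Str.strip l) ((l2 :: b3) ++ rest) := by
        simp only [List.cons_append, pvPassM, hl, hl2]
        simp
      rw [hstep, ih (by simp) (fun x hx => hall x (List.mem_cons_of_mem l hx)) rest
        (PySem.Str.strip l) hrest]
      have hpl : PySem.Str.startswith (PySem.Str.strip l) "|" = true := hl
      have hinner : (PySem.Str.strip l != "" && !(PySem.Str.startswith (PySem.Str.strip l) "|"))
          = false := by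
        rw [hpl]; simp
      rw [hinner]
      have hlast : (l :: l2 :: b3).getLastD "" = (l2 :: b3).getLastD "" := by
        rw [List.getLastD_cons, pvGetLastD_irrel]
      rw [hlast]
      simp

-- a maximal non-table run is copied verbatim
lemma pvPassM_plainRun (b : List String) (hne : b ≠ [])
    (hall : ∀ x ∈ b, PySem.Str.startswith (PySem.Str.strip x) "|" = false) :
    ∀ (rest : List String) (prev : String),
    pvPassM prev (b ++ rest) = b ++ pvPassM (PySem.Str.strip (b.getLastD "")) rest := by
  induction b with
  | nil => exact absurd rfl hne
  | cons l b2 ih =>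
    intro rest prev
    have hl : PySem.Str.startswith (PySem.Str.strip l) "|" = false := hall l (by simp)
    cases b2 with
    | nil =>
      rw [List.singleton_append, pvPassM_cons_nontable prev l rest hl]
      simp [List.getLastD]
    | cons l2 b3 =>
      rw [List.cons_append, pvPassM_cons_nontable prev l _ hl]
      rw [ih (by simp) (fun x hx => hall x (List.mem_cons_of_mem l hx)) rest
        (PySem.Str.strip l)]
      have hlast : (l :: l2 :: b3).getLastD "" = (l2 :: b3).getLastD "" := by
        rw [List.getLastD_cons, pvGetLastD_irrel]
      rw [hlast]
      simp

-- B's run emission equals the per-line bridge pass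
lemma pvEmitPass : ∀ (n : Nat) (ls : List String), ls.length ≤ n → ∀ (prev : String),
    (∀ h ∈ ls.head?, PySem.Str.startswith (PySem.Str.strip h) "|" = true →
      PySem.Str.startswith prev "|" = false) →
    pvEmit prev (pvRuns ls) = pvPassM prev ls := by
  intro n
  induction n with
  | zero =>
    intro ls hlen prev _
    have : ls = [] := by
      cases ls with
      | nil => rfl
      | cons a t => simp at hlen
    subst this
    rfl
  | succ n ih =>
    intro ls hlen prev hp
    cases hls : ls with
    | nil => rfl
    | cons l ls0 =>
      subst hls
      obtain ⟨b, ls', hR, hEq, hNe, hMem, hAlt⟩ := pvRuns_decomp (l :: ls0) (by simp)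
      simp only [List.headD_cons] at hR hMem hAlt
      have hlen' : ls'.length ≤ n := by
        have h1 := congrArg List.length hEq
        simp only [List.length_cons, List.length_append] at h1
        have h2 : 1 ≤ b.length := by
          cases b with
          | nil => exact absurd rfl hNe
          | cons _ _ => simp
        simp only [List.length_cons] at hlen
        omega
      have hlast_mem : b.getLastD "" ∈ b := pvGetLastD_mem b hNe
      by_cases htb : PySem.Str.startswith (PySem.Str.strip l) "|" = true
      · -- table run
        have hprev : PySem.Str.startswith prev "|" = false := hp l (by simp) htb
        have hrest_nt : ∀ h ∈ ls'.head?,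
            PySem.Str.startswith (PySem.Str.strip h) "|" = false := by
          intro h hh
          rw [hAlt h hh, htb]
          rfl
        have htail : pvEmit (PySem.Str.strip (b.getLastD "")) (pvRuns ls')
            = pvPassM (PySem.Str.strip (b.getLastD "")) ls' := by
          apply ih ls' hlen'
          intro h hh hht
          rw [hrest_nt h hh] at hht
          simp at hht
        rw [hR]
        have hunf : ∀ (p : String) (t : Bool) (bb : List String) (rs : List (Bool × List String)),
            pvEmit p ((t, bb) :: rs) =
              (if t then
                 (if p != "" then [""] else [])
                 ++ bb
                 ++ (match rs with
                     | [] => []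
                     | (_, b2) :: _ => if PySem.Str.strip (b2.headD "") != "" then [""] else [])
               else bb)
              ++ pvEmit (PySem.Str.strip (bb.getLastD "")) rs := fun _ _ _ _ => rfl
        rw [hunf, htb]
        have hafter : (match pvRuns ls' with
            | [] => ([] : List String)
            | (_, b2) :: _ => if PySem.Str.strip (b2.headD "") != "" then [""] else [])
            = (match ls'.head? with
               | none => ([] : List String)
               | some nxt => if PySem.Str.strip nxt != "" then [""] else []) := by
          cases hls' : ls' with
          | nil => rfl
          | cons h tl =>
            obtain ⟨b2, ls'', hR2, hEq2, hNe2, _, _⟩ := pvRuns_decomp (h :: tl) (by simp)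
            rw [hR2]
            cases b2 with
            | nil => exact absurd rfl hNe2
            | cons x xs =>
              have hx : x = h := by
                have := hEq2
                simp only [List.cons_append] at this
                injection this with h1 _
                exact h1.symm
              subst hx
              simp
        rw [hafter, htail]
        rw [hEq, pvPassM_tableRun b hNe (fun x hx => by rw [hMem x hx, htb]) ls' prev
          (fun h hh => hrest_nt h hh)]
        rw [hprev]
        simp
      · -- non-table run
        have htb' : PySem.Str.startswith (PySem.Str.strip l) "|" = false := by
          simpa using htb
        have htail : pvEmit (PySem.Str.strip (b.getLastD "")) (pvRuns ls')
            = pvPassM (PySem.Str.strip (b.getLastD "")) ls' := by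
          apply ih ls' hlen'
          intro h hh _
          exact (hMem (b.getLastD "") hlast_mem).trans htb'
        rw [hR]
        have hunf : ∀ (p : String) (t : Bool) (bb : List String) (rs : List (Bool × List String)),
            pvEmit p ((t, bb) :: rs) =
              (if t then
                 (if p != "" then [""] else [])
                 ++ bb
                 ++ (match rs with
                     | [] => []
                     | (_, b2) :: _ => if PySem.Str.strip (b2.headD "") != "" then [""] else [])
               else bb)
              ++ pvEmit (PySem.Str.strip (bb.getLastD "")) rs := fun _ _ _ _ => rfl
        rw [hunf, htb']
        simp only [Bool.false_eq_true, if_false]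
        rw [htail, hEq, pvPassM_plainRun b hNe (fun x hx => by rw [hMem x hx, htb']) ls' prev]

theorem pv_main (text : String) :
    fix_markdown_tables_py text = fix_markdown_tables_py_alt text := by
  have hA : fix_markdown_tables_py text
      = PySem.Str.join "\n" (pvPass3 (pvPass2 ""
          ((PySem.Str.split? (PySem.Str.join "\n"
            (pvMergeA ((PySem.Str.split? text "\n").getD []))) "\n").getD []))) := rfl
  have hB : fix_markdown_tables_py_alt text
      = PySem.Str.join "\n"
          (pvEmit "" (pvRuns (pvMergeBack ((PySem.Str.split? text "\n").getD [])))) := rfl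
  rw [hA, hB,
      pvSplitJoin (pvMergeA ((PySem.Str.split? text "\n").getD []))
        (pvMergeA_ne_nil _ (pvSplitLines_ne_nil text))
        (pvMergeA_nlfree _ (pvSplitLines_nlfree text)),
      pvPassEq, pvMergeBA,
      pvEmitPass (pvMergeA ((PySem.Str.split? text "\n").getD [])).length _ le_rfl ""
        (by intro h _ _; decide)]

-- ===== VERDICT (by name: the statement is the Claim_ definition above) =====
theorem fix_markdown_tables_py_spec : Claim_equal_fix_markdown_tables_py := by
  intro text _
  unfold Spec_fix_markdown_tables_py
  exact pv_main text
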